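-- pv_equiv track=rewrite | github.com/Magolor/hoi4dev | example_scripts/PIHC_v0_2_1_2024_10_06/scripts/muffin_gamble_calculator/wtf.py | v4
-- ===== SOURCE A (Python) =====
-- def v4(L, T=500, F=200):
--     S = [sum(L[i:]) for i in range(len(L))]; g = 0
--     for i, (l, s) in enumerate(zip(L, S)):
--         if i==len(L)-1 and s>=0:
--             g += 2*l
--         elif s >= 0:
--             g += l
--     return g
-- ===== SOURCE B (Python) =====
-- def v4(L, T=500, F=200):
--     s = 0
--     g = 0
--     first = True
--     for x in reversed(L):
--         s += x
--         if s >= 0: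
--             g += 2 * x if first else x
--         first = False
--     return g
-- ===== Notes on version B (the rewrite author's own statement) =====
-- stated objective: faster
-- what changed: Replaces the quadratic list of recomputed suffix sums plus an enumerated forward scan with a single reverse pass that maintains a running suffix sum (a flag marks the last element for the doubling).
import Mathlib
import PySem

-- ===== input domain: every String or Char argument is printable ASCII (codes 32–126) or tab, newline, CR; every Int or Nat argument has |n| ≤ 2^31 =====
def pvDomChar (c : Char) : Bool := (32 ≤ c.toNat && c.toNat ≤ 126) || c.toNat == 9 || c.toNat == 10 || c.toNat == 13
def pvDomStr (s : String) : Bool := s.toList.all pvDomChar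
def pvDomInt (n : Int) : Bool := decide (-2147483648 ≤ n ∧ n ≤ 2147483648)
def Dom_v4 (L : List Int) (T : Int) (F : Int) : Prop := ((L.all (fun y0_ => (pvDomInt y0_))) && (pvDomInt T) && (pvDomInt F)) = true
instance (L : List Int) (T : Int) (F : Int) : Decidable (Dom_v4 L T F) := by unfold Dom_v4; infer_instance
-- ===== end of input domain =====

-- B replaces A's quadratic recomputation of every suffix sum with one reverse pass
-- keeping a running suffix sum (objective: faster, asymptotically).


-- ===== PORT A =====
-- S = [sum(L[i:]) for i in range(len(L))]; then a fold over enumerate(zip(L, S)).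
-- L[i:] with i drawn from range(len(L)) is PySem.List.slice L (some i) none (exact).
def v4 (L : List Int) (T : Int) (F : Int) : Int :=
  let S := (List.range L.length).map (fun (i : Nat) => (PySem.List.slice L (some (i : Int)) none).sum)
  (PySem.List.enumerate (L.zip S) 0).foldl
    (fun g p =>
      if p.1 = (L.length : Int) - 1 ∧ p.2.2 ≥ 0 then g + 2 * p.2.1
      else if p.2.2 ≥ 0 then g + p.2.1
      else g) 0

-- ===== PORT B =====
-- one reverse pass: running suffix sum s, accumulator g, flag 'first' marking the last element
def v4_alt (L : List Int) (T : Int) (F : Int) : Int :=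
  (L.reverse.foldl
    (fun (st : Int × Int × Bool) x =>
      let s := st.1 + x
      (s, (if s ≥ 0 then st.2.1 + (if st.2.2 then 2 * x else x) else st.2.1), false))
    ((0 : Int), (0 : Int), true)).2.1

-- ===== PRECONDITION & SPEC =====
def Spec_v4 (L : List Int) (T : Int) (F : Int) (out : Int) : Prop := out = v4_alt L T F
instance (L : List Int) (T : Int) (F : Int) (out : Int) : Decidable (Spec_v4 L T F out) := by unfold Spec_v4; infer_instance

-- ===== CLAIM (what is proved, stated in full; the proofs are below) =====
def Claim_equal_v4 : Prop := ∀ (L : List Int) (T : Int) (F : Int), Dom_v4 L T F → Spec_v4 L T F (v4 L T F)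

-- ===== LEMMAS AND PROOFS =====

-- A's loop body, with the last-index test parameterised by m = len(L)-1
def stepA (m : Int) (g : Int) (p : Int × Int × Int) : Int :=
  if p.1 = m ∧ p.2.2 ≥ 0 then g + 2 * p.2.1
  else if p.2.2 ≥ 0 then g + p.2.1
  else g

-- B's loop body
def stepB (st : Int × Int × Bool) (x : Int) : Int × Int × Bool :=
  let s := st.1 + x
  (s, (if s ≥ 0 then st.2.1 + (if st.2.2 then 2 * x else x) else st.2.1), false)

-- A's list S of suffix sums
def suffixes (L : List Int) : List Int := (List.range L.length).map (fun i => (L.drop i).sum)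

-- reference: front recursion, doubling the last element
def ref : List Int → Int
  | [] => 0
  | [x] => if x ≥ 0 then 2 * x else 0
  | x :: y :: t => (if x + (y :: t).sum ≥ 0 then x else 0) + ref (y :: t)

-- contributions of l's elements when the suffix after l sums to s (no doubling)
def refGo : List Int → Int → Int
  | [], _ => 0
  | x :: t, s => (if x + t.sum + s ≥ 0 then x else 0) + refGo t s

theorem v4_eq (L : List Int) (T F : Int) :
    v4 L T F = (PySem.List.enumerate (L.zip (suffixes L)) 0).foldl (stepA ((L.length : Int) - 1)) 0 := by
  unfold v4
  have h : (List.range L.length).map (fun (i : Nat) => (PySem.List.slice L (some (i : Int)) none).sum)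
      = suffixes L := by
    unfold suffixes
    exact List.map_congr_left (fun i _ => by rw [PySem.List.slice_from_natCast])
  rw [h]
  rfl

theorem v4_alt_eq (L : List Int) (T F : Int) :
    v4_alt L T F = (L.reverse.foldl stepB ((0 : Int), (0 : Int), true)).2.1 := rfl

theorem suffixes_cons (x : Int) (t : List Int) :
    suffixes (x :: t) = (x + t.sum) :: suffixes t := by
  unfold suffixes
  rw [List.length_cons, List.range_succ_eq_map, List.map_cons, List.map_map]
  simp [Function.comp_def]

theorem stepA_add (m : Int) : ∀ (l : List (Int × Int × Int)) (g : Int),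
    l.foldl (stepA m) g = g + l.foldl (stepA m) 0 := by
  intro l
  induction l with
  | nil => intro g; simp
  | cons p t ih =>
    intro g
    simp only [List.foldl_cons]
    rw [ih (stepA m g p), ih (stepA m 0 p)]
    have : stepA m g p = g + stepA m 0 p := by
      unfold stepA; split_ifs <;> ring
    rw [this]; ring

theorem stepA_shift (m : Int) : ∀ (l : List (Int × Int)) (k g : Int),
    (PySem.List.enumerate l (k + 1)).foldl (stepA (m + 1)) g
      = (PySem.List.enumerate l k).foldl (stepA m) g := by
  intro l
  induction l with
  | nil => intro k g; simp [PySem.List.enumerate_nil]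
  | cons p t ih =>
    intro k g
    rw [PySem.List.enumerate_cons, PySem.List.enumerate_cons]
    simp only [List.foldl_cons]
    have hc : stepA (m + 1) g (k + 1, p) = stepA m g (k, p) := by
      unfold stepA
      by_cases h : k = m
      · subst h; simp
      · have h2 : ¬ ((k : Int) + 1 = m + 1) := by omega
        simp [h, h2]
    rw [hc, ih]

theorem A_eq_ref (T F : Int) : ∀ L, v4 L T F = ref L := by
  intro L
  induction L with
  | nil => rfl
  | cons x t ih =>
    cases t with
    | nil =>
      rw [v4_eq]
      simp [suffixes, PySem.List.enumerate_cons, PySem.List.enumerate_nil, stepA, ref]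
      split_ifs <;> rfl
    | cons y t' =>
      rw [v4_eq]
      rw [suffixes_cons]
      rw [List.zip_cons_cons, PySem.List.enumerate_cons]
      simp only [List.foldl_cons]
      have hm : ((x :: y :: t').length : Int) - 1 = ((y :: t').length : Int) - 1 + 1 := by
        push_cast [List.length_cons]
        ring
      rw [hm]
      have h0 : stepA (((y :: t').length : Int) - 1 + 1) 0 (0, x, x + (y :: t').sum)
          = if x + (y :: t').sum ≥ 0 then x else 0 := by
        unfold stepA
        have hne : ¬ ((0 : Int) = ((y :: t').length : Int) - 1 + 1) := by
          push_cast [List.length_cons]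
          omega
        simp only [hne, false_and, if_false]
        split_ifs <;> ring
      rw [h0, stepA_add, stepA_shift, ← v4_eq (y :: t') T F, ih]
      have hr : ref (x :: y :: t') = (if x + (y :: t').sum ≥ 0 then x else 0) + ref (y :: t') := rfl
      rw [hr]

theorem stepB_go : ∀ (l : List Int) (s g : Int),
    l.reverse.foldl stepB (s, g, false) = (s + l.sum, g + refGo l s, false) := by
  intro l
  induction l with
  | nil => intro s g; simp [refGo]
  | cons x t ih =>
    intro s g
    rw [List.reverse_cons, List.foldl_append]
    rw [ih s g]
    simp only [List.foldl_cons, List.foldl_nil]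
    simp only [stepB, refGo, List.sum_cons, Prod.mk.injEq, Bool.false_eq_true, if_false]
    refine ⟨by ring, ?_, trivial⟩
    split_ifs with h1 h2
    all_goals linarith

theorem B_eq_ref (T F : Int) : ∀ L, v4_alt L T F = ref L := by
  intro L
  rcases List.eq_nil_or_concat L with h | ⟨l, z, h⟩
  · subst h; rfl
  · subst h
    rw [v4_alt_eq, List.concat_eq_append]
    rw [List.reverse_append, List.reverse_singleton, List.singleton_append]
    simp only [List.foldl_cons]
    have h1 : stepB ((0 : Int), (0 : Int), true) z
        = (z, (if z ≥ 0 then 2 * z else 0), false) := by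
      simp only [stepB, zero_add, if_true]
    rw [h1, stepB_go]
    have h2 : ∀ l z, ref (l ++ [z]) = refGo l z + (if z ≥ 0 then 2 * z else 0) := by
      intro l
      induction l with
      | nil => intro z; simp [ref, refGo]
      | cons x t ih =>
        intro z
        have hcons : ref (x :: (t ++ [z]))
            = (if x + (t ++ [z]).sum ≥ 0 then x else 0) + ref (t ++ [z]) := by
          cases t <;> rfl
        rw [List.cons_append, hcons, ih]
        have hs : (t ++ [z]).sum = t.sum + z := by simp
        rw [hs]
        have hg : refGo (x :: t) z = (if x + t.sum + z ≥ 0 then x else 0) + refGo t z := rfl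
        rw [hg]
        split_ifs with h1 h2
        all_goals linarith
    rw [h2]
    show (if z ≥ 0 then 2 * z else 0) + refGo l z = refGo l z + (if z ≥ 0 then 2 * z else 0)
    ring

-- ===== VERDICT (by name: the statement is the Claim_ definition above) =====
theorem v4_spec : Claim_equal_v4 := by
  intro L T F _
  unfold Spec_v4
  rw [A_eq_ref T F L, B_eq_ref T F L]
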